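-- pv_equiv track=rewrite | github.com/minyi-k03/Coding-Test | 프로그래머스/0/120824. 짝수 홀수 개수/짝수 홀수 개수.py | solution
-- ===== SOURCE A (Python) =====
-- def solution(num_list):
--     answer = [0,0]
--
--     for i in num_list:
--         if i%2==0:
--             answer[0]+=num_list.count(i)
--         elif i%2!=0:
--             answer[1]+=num_list.count(i)
--
--     return answer
-- ===== SOURCE B (Python) =====
-- def solution(num_list):
--     counts = {}
--     for i in num_list:
--         counts[i] = counts.get(i, 0) + 1
--     even = 0
--     odd = 0
--     for v, c in counts.items():
--         if v % 2 == 0: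
--             even += c * c
--         else:
--             odd += c * c
--     return [even, odd]
-- ===== Notes on version B (the rewrite author's own statement) =====
-- stated objective: faster
-- what changed: Replaces the per-element num_list.count inner scan with a single counting-dict pass followed by summing c*c per distinct value split by parity.
import Mathlib
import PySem

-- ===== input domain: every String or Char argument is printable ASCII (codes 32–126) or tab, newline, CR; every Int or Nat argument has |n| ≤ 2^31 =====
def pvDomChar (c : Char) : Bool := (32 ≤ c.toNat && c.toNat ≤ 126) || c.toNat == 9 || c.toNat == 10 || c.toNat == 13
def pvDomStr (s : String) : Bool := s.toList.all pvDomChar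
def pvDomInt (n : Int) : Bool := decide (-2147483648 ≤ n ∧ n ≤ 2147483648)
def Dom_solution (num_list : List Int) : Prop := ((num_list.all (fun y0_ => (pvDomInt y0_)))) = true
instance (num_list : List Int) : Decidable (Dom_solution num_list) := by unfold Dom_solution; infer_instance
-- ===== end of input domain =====

-- B replaces A's per-element num_list.count scan (O(n^2)) by one counting-dict pass
-- plus a c*c sum per distinct value split by parity (O(n)); objective: faster.

-- ===== PORT A =====
def solution (num_list : List Int) : List Int :=
  -- answer = [0,0]; for i in num_list: if i%2==0: answer[0]+=count  elif i%2!=0: answer[1]+=count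
  let p := num_list.foldl (fun (p : Int × Int) i =>
    if PySem.Int.mod i 2 == 0 then (p.1 + (num_list.count i : Int), p.2)
    else if PySem.Int.mod i 2 != 0 then (p.1, p.2 + (num_list.count i : Int))
    else p) (0, 0)
  [p.1, p.2]

-- ===== PORT B =====
def solution_alt (num_list : List Int) : List Int :=
  -- counts = {}; for i: counts[i] = counts.get(i,0)+1; then sum c*c by parity of v
  let counts := num_list.foldl (fun d i => d.insert i (d.getD i 0 + 1))
    (PySem.Dict.empty : PySem.Dict Int Int)
  let p := counts.items.foldl (fun (p : Int × Int) vc =>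
    if PySem.Int.mod vc.1 2 == 0 then (p.1 + vc.2 * vc.2, p.2)
    else (p.1, p.2 + vc.2 * vc.2)) (0, 0)
  [p.1, p.2]

-- ===== PRECONDITION & SPEC =====
def Spec_solution (num_list : List Int) (out : List Int) : Prop := out = solution_alt num_list
instance (num_list : List Int) (out : List Int) : Decidable (Spec_solution num_list out) := by unfold Spec_solution; infer_instance

-- ===== CLAIM (what is proved, stated in full; the proofs are below) =====
def Claim_equal_solution : Prop := ∀ (num_list : List Int), Dom_solution num_list → Spec_solution num_list (solution num_list)

-- ===== LEMMAS AND PROOFS =====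

-- the even / odd contribution of one occurrence (A side) and of one distinct value (B side)
def gE (l : List Int) (i : Int) : Int := if PySem.Int.mod i 2 == 0 then (l.count i : Int) else 0
def gO (l : List Int) (i : Int) : Int := if PySem.Int.mod i 2 == 0 then 0 else (l.count i : Int)

lemma solution_eq_sums (l : List Int) :
    solution l = [(l.map (gE l)).sum, (l.map (gO l)).sum] := by
  unfold solution
  rw [PySem.List.foldl_congr_mem _ _
      (fun (p : Int × Int) i => (p.1 + gE l i, p.2 + gO l i)) _ ?_]
  · rw [PySem.List.foldl_prod_mk (f := fun a i => a + gE l i) (g := fun a i => a + gO l i),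
      PySem.List.foldl_add, PySem.List.foldl_add]
    simp
  · intro p i _
    simp only [gE, gO]
    rcases Int.emod_two_eq i with h | h <;>
      simp [h]

lemma solution_alt_eq_sums (l : List Int) :
    solution_alt l = [((PySem.Set.ofList l).map (fun v => (l.count v : Int) * gE l v)).sum,
                      ((PySem.Set.ofList l).map (fun v => (l.count v : Int) * gO l v)).sum] := by
  unfold solution_alt
  simp only [PySem.Dict.foldl_insert_getD_add_one_eq_counter, PySem.Dict.items_counter,
    List.foldl_map]
  rw [PySem.List.foldl_congr_mem _ _
      (fun (p : Int × Int) v => (p.1 + (l.count v : Int) * gE l v,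
                                 p.2 + (l.count v : Int) * gO l v)) _ ?_]
  · rw [PySem.List.foldl_prod_mk (f := fun a v => a + (l.count v : Int) * gE l v)
        (g := fun a v => a + (l.count v : Int) * gO l v),
      PySem.List.foldl_add, PySem.List.foldl_add]
    simp
  · intro p v _
    simp only [gE, gO]
    rcases Int.emod_two_eq v with h | h <;> simp [h]

-- a sum over the occurrences of l equals the count-weighted sum over the distinct values
lemma sum_dedup (l : List Int) (f : Int → Int) :
    (l.map f).sum = ((PySem.Set.ofList l).map (fun v => (l.count v : Int) * f v)).sum := by
  rw [Finset.sum_list_map_count l f,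
    Finset.sum_list_map_count (PySem.Set.ofList l) (fun v => (l.count v : Int) * f v)]
  have hfin : (PySem.Set.ofList l).toFinset = l.toFinset := by
    ext x; simp [PySem.Set.mem_ofList]
  rw [hfin]
  refine Finset.sum_congr rfl ?_
  intro x hx
  have hx' : x ∈ PySem.Set.ofList l := by
    rw [PySem.Set.mem_ofList]; exact List.mem_toFinset.mp hx
  rw [List.count_eq_one_of_mem (PySem.Set.nodup_ofList l) hx']
  simp

-- ===== VERDICT (by name: the statement is the Claim_ definition above) =====
theorem solution_spec : Claim_equal_solution := by
  intro l _
  unfold Spec_solution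
  rw [solution_eq_sums, solution_alt_eq_sums, sum_dedup l (gE l), sum_dedup l (gO l)]
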